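-- pv_equiv track=rewrite | github.com/yehnan/project_euler_python | p002.py | efn
-- ===== SOURCE A (Python) =====
-- memo = {0: 0, 1: 1}
--
-- def fib(n):
--     if n not in memo:
--         memo[n] = fib(n-1) + fib(n-2)
--     return memo[n]
--
-- def efn(max):
--     result = 0
--     n = 1
--     fn = fib(n)
--     while fn <= max:
--         if fn % 2 == 0:
--             result += fn
--         n += 1
--         fn = fib(n)
--     return result
-- ===== SOURCE B (Python) =====
-- def efn(max):
--     result = 0
--     a, b = 1, 1
--     while a <= max:
--         if a % 2 == 0:
--             result += a
--         a, b = b, a + b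
--     return result
-- ===== Notes on version B (the rewrite author's own statement) =====
-- stated objective: simpler
-- what changed: Replaced the memoized recursive fib indexed by a counter n with a rolling pair (a, b) generated iteratively inside a single loop.
import Mathlib
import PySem

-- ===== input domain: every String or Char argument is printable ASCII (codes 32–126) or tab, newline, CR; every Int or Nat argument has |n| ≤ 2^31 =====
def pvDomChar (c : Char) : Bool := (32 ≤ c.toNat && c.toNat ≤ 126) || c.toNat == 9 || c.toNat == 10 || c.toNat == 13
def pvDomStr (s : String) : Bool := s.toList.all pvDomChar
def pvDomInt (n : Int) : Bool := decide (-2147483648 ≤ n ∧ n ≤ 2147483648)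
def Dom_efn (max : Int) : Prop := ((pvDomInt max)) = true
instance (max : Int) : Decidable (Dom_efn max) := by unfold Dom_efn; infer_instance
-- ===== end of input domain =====

-- B replaces A's memoized recursive fib with a rolling pair updated in one loop (objective: simpler).

-- ===== PORT A =====
-- A's fib(n): memoized recursion, threading the memo dict (Python's global `memo`).
-- Fuel n.toNat+1 bounds the recursion depth; exact for every call efn makes (n ≥ 1, memo ⊇ {0:0,1:1}).
def fibA : Nat → Int → PySem.Dict Int Int → Int × PySem.Dict Int Int
  | 0, _, memo => (0, memo)   -- unreachable with fuel = n.toNat+1 on efn's calls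
  | fuel+1, n, memo =>
    match memo.get? n with
    | some v => (v, memo)
    | none =>
      let r1 := fibA fuel (n-1) memo
      let r2 := fibA fuel (n-2) r1.2
      let m3 := r2.2.insert n (r1.1 + r2.1)
      (m3.getD n 0, m3)

-- A's while loop: fn ≤ max, add even fn, n += 1, recompute fn.
-- Fuel max.toNat+2 bounds the iterations exactly (fib n ≥ n-1, so the loop exits before n = max+2).
def efnLoopA : Nat → Int → Int → Int → PySem.Dict Int Int → Int
  | 0, _, result, _, _ => result
  | fuel+1, max, result, n, memo =>
    let r := fibA (n.toNat+1) n memo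
    if r.1 ≤ max then
      efnLoopA fuel max (if PySem.Int.mod r.1 2 = 0 then result + r.1 else result) (n+1) r.2
    else result

def efn (max : Int) : Int :=
  efnLoopA (max.toNat+2) max 0 1 (PySem.Dict.ofList [((0 : Int), (0 : Int)), (1, 1)])

-- ===== PORT B =====
-- B's while loop over the rolling pair (a, b); same fuel bound, same exactness reason.
def efnLoopB : Nat → Int → Int → Int → Int → Int
  | 0, _, _, _, result => result
  | fuel+1, max, a, b, result =>
    if a ≤ max then
      efnLoopB fuel max b (a+b) (if PySem.Int.mod a 2 = 0 then result + a else result)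
    else result

def efn_alt (max : Int) : Int := efnLoopB (max.toNat+2) max 1 1 0

-- ===== PRECONDITION & SPEC =====
def Spec_efn (max : Int) (out : Int) : Prop := out = efn_alt max
instance (max : Int) (out : Int) : Decidable (Spec_efn max out) := by unfold Spec_efn; infer_instance

-- ===== CLAIM (what is proved, stated in full; the proofs are below) =====
def Claim_equal_efn : Prop := ∀ (max : Int), Dom_efn max → Spec_efn max (efn max)

-- ===== LEMMAS AND PROOFS =====

-- the memo after A has computed fib up to index k (k ≥ 1)
def memoUpTo : Nat → PySem.Dict Int Int
  | 0 => PySem.Dict.ofList [((0 : Int), (0 : Int)), (1, 1)]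
  | 1 => PySem.Dict.ofList [((0 : Int), (0 : Int)), (1, 1)]
  | k+2 => (memoUpTo (k+1)).insert ((k : Int)+2) ((Nat.fib (k+2) : Int))

theorem memoUpTo_get?_le (k n : Nat) (h : n ≤ k) :
    (memoUpTo k).get? (n : Int) = some ((Nat.fib n : Int)) := by
  induction k with
  | zero => interval_cases n; decide
  | succ k ih =>
    match k with
    | 0 => interval_cases n <;> decide
    | k+1 =>
      show ((memoUpTo (k+1)).insert ((k : Int)+2) ((Nat.fib (k+2) : Int))).get? (n : Int) = _
      rw [PySem.Dict.get?_insert]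
      rcases Nat.lt_or_ge n (k+2) with hlt | hge
      · rw [if_neg (by omega)]
        exact ih (by omega)
      · have hn : n = k+2 := by omega
        subst hn
        rw [if_pos (by push_cast; ring)]

theorem memoUpTo_get?_gt (k n : Nat) (hk : 1 ≤ k) (h : k < n) :
    (memoUpTo k).get? (n : Int) = none := by
  induction k with
  | zero => omega
  | succ k ih =>
    match k with
    | 0 =>
      show ((PySem.Dict.empty.insert (0:Int) (0:Int)).insert 1 1).get? (n:Int) = none
      rw [PySem.Dict.get?_insert, PySem.Dict.get?_insert, PySem.Dict.get?_empty]
      rw [if_neg (by omega), if_neg (by omega)]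
    | k+1 =>
      show ((memoUpTo (k+1)).insert ((k : Int)+2) ((Nat.fib (k+2) : Int))).get? (n : Int) = none
      rw [PySem.Dict.get?_insert, if_neg (by omega)]
      exact ih (by omega) (by omega)

-- unfolding equation for one step of A's fib
theorem fibA_succ (fuel : Nat) (n : Int) (memo : PySem.Dict Int Int) :
    fibA (fuel+1) n memo =
      match memo.get? n with
      | some v => (v, memo)
      | none =>
        let r1 := fibA fuel (n-1) memo
        let r2 := fibA fuel (n-2) r1.2
        let m3 := r2.2.insert n (r1.1 + r2.1)
        (m3.getD n 0, m3) := rfl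

-- one fresh call of A's fib at index j+2 with memo filled up to j+1: a single memo-extending step
theorem fibA_step (fuel : Nat) (j : Nat) :
    fibA (fuel+2) ((j : Int)+2) (memoUpTo (j+1)) =
      ((Nat.fib (j+2) : Int), memoUpTo (j+2)) := by
  have hnone : (memoUpTo (j+1)).get? ((j : Int)+2) = none := by
    have := memoUpTo_get?_gt (j+1) (j+2) (by omega) (by omega)
    rwa [show ((j+2 : Nat) : Int) = (j : Int)+2 by push_cast; ring] at this
  have e1 : fibA (fuel+1) ((j : Int)+2-1) (memoUpTo (j+1)) = ((Nat.fib (j+1) : Int), memoUpTo (j+1)) := by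
    rw [show (j : Int)+2-1 = ((j+1 : Nat) : Int) by push_cast; ring]
    rw [fibA_succ, memoUpTo_get?_le (j+1) (j+1) le_rfl]
  have e2 : fibA (fuel+1) ((j : Int)+2-2) (memoUpTo (j+1)) = ((Nat.fib j : Int), memoUpTo (j+1)) := by
    rw [show (j : Int)+2-2 = ((j : Nat) : Int) by ring]
    rw [fibA_succ, memoUpTo_get?_le (j+1) j (by omega)]
  have hins : (memoUpTo (j+1)).insert ((j : Int)+2) ((Nat.fib (j+1) : Int) + (Nat.fib j : Int))
      = memoUpTo (j+2) := by
    show _ = (memoUpTo (j+1)).insert ((j : Int)+2) ((Nat.fib (j+2) : Int))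
    congr 1
    rw [Nat.fib_add_two]; push_cast; ring
  rw [show fuel+2 = (fuel+1)+1 by ring, fibA_succ, hnone]
  dsimp only
  rw [e1, e2]
  dsimp only
  rw [hins]
  refine Prod.ext ?_ rfl
  show (memoUpTo (j+2)).getD ((j : Int)+2) 0 = (Nat.fib (j+2) : Int)
  have hg := memoUpTo_get?_le (j+2) (j+2) le_rfl
  rw [show ((j+2 : Nat) : Int) = (j : Int)+2 by push_cast; ring] at hg
  rw [PySem.Dict.getD_eq_get?_getD, hg]; rfl

-- unfolding equations for one iteration of each loop
theorem efnLoopA_succ (fuel : Nat) (max result n : Int) (memo : PySem.Dict Int Int) :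
    efnLoopA (fuel+1) max result n memo =
      (let r := fibA (n.toNat+1) n memo
       if r.1 ≤ max then
         efnLoopA fuel max (if PySem.Int.mod r.1 2 = 0 then result + r.1 else result) (n+1) r.2
       else result) := rfl

theorem efnLoopB_succ (fuel : Nat) (max a b result : Int) :
    efnLoopB (fuel+1) max a b result =
      (if a ≤ max then
        efnLoopB fuel max b (a+b) (if PySem.Int.mod a 2 = 0 then result + a else result)
      else result) := rfl

-- lockstep: A's loop from index j+2 with memo filled up to j+1 equals B's loop with the
-- corresponding rolling pair
theorem loop_lockstep (fuel : Nat) (max : Int) :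
    ∀ (j : Nat) (result : Int),
      efnLoopA fuel max result ((j : Int)+2) (memoUpTo (j+1)) =
        efnLoopB fuel max ((Nat.fib (j+2) : Int)) ((Nat.fib (j+3) : Int)) result := by
  induction fuel with
  | zero => intro j result; rfl
  | succ fuel ih =>
    intro j result
    have htn : (((j : Int)+2).toNat)+1 = (j+1)+2 := by omega
    rw [efnLoopA_succ, efnLoopB_succ]
    dsimp only
    rw [htn, fibA_step (j+1) j]
    rcases le_or_gt ((Nat.fib (j+2) : Int)) max with hle | hgt
    · rw [if_pos hle, if_pos hle]
      have hrec := ih (j+1)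
        (if PySem.Int.mod ((Nat.fib (j+2) : Int)) 2 = 0 then result + (Nat.fib (j+2) : Int) else result)
      rw [show ((j : Int)+2+1) = ((j+1 : Nat) : Int)+2 by push_cast; ring]
      rw [hrec]
      congr 2
      rw [show j+1+3 = (j+2)+2 from rfl, Nat.fib_add_two]
    · rw [if_neg (not_le.mpr hgt), if_neg (not_le.mpr hgt)]

theorem efn_eq (max : Int) : efn max = efn_alt max := by
  show efnLoopA (max.toNat+2) max 0 1 (PySem.Dict.ofList [((0:Int),(0:Int)),(1,1)]) =
    efnLoopB (max.toNat+2) max 1 1 0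
  -- first iteration of both loops: fib(1) = 1 is a memo hit
  have hfib1 : fibA (((1 : Int).toNat)+1) 1 (PySem.Dict.ofList [((0:Int),(0:Int)),(1,1)]) =
      (1, PySem.Dict.ofList [((0:Int),(0:Int)),(1,1)]) := by decide
  rw [show max.toNat+2 = (max.toNat+1)+1 by ring, efnLoopA_succ, efnLoopB_succ]
  dsimp only
  rw [hfib1]
  rcases le_or_gt (1:Int) max with hle | hgt
  · rw [if_pos hle, if_pos hle]
    have hrec := loop_lockstep (max.toNat+1) max 0
      (if PySem.Int.mod (1:Int) 2 = 0 then 0 + 1 else 0)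
    rw [show ((0 : Nat) : Int)+2 = (1:Int)+1 by ring,
      show memoUpTo 1 = PySem.Dict.ofList [((0:Int),(0:Int)),(1,1)] from rfl] at hrec
    rw [hrec]
    norm_num
  · rw [if_neg (not_le.mpr hgt), if_neg (not_le.mpr hgt)]

-- ===== VERDICT (by name: the statement is the Claim_ definition above) =====
theorem efn_spec : Claim_equal_efn := by
  intro max _
  show efn max = efn_alt max
  exact efn_eq max
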